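-- pv_equiv track=rewrite | github.com/sachinkaushik/loss-prevention | src/gst-pipeline-generator.py | format_pipeline_multiline
-- ===== SOURCE A (Python) =====
-- def format_pipeline_multiline(pipeline):
--     # Split pipeline into elements
--     elems = [e.strip() for e in pipeline.split('!') if e.strip()]
--     formatted = []
--     for idx, elem in enumerate(elems):
--         is_first = idx == 0
--         indent = '' if is_first else '  '
--         if idx < len(elems) - 1:
--             line = f"{indent}{elem} ! \\"
--         else:
--             line = f"{indent}{elem}"
--         formatted.append(line)
--     return '\n'.join(formatted)
-- ===== SOURCE B (Python) =====
-- def format_pipeline_multiline(pipeline):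
--     elems = [e for e in map(str.strip, pipeline.split('!')) if e]
--     return ' ! \\\n  '.join(elems)
-- ===== Notes on version B (the rewrite author's own statement) =====
-- stated objective: simpler
-- what changed: Replaces the enumerate loop with idx/is_first/last-element branching and an accumulator list by a single join with the separator ' ! \\ ', which embeds the continuation backslash, the newline and the two-space indent.
import Mathlib
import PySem

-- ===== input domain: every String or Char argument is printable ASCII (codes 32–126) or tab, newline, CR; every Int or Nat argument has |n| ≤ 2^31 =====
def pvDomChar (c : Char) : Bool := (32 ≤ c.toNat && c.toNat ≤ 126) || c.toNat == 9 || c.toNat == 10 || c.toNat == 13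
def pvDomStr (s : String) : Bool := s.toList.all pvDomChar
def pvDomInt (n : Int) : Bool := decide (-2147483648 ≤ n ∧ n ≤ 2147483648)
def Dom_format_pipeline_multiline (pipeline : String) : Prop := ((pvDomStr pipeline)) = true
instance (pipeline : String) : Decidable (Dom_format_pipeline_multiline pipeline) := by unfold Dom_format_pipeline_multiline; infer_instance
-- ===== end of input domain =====

-- B replaces A's enumerate loop (idx/is_first/last branching, accumulator list) by one join with
-- the separator " ! \\\n  "; same output, simpler decomposition.

-- ===== PORT A =====
def format_pipeline_multiline (pipeline : String) : String :=
  -- elems = [e.strip() for e in pipeline.split('!') if e.strip()]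
  let elems := ((PySem.Chars.splitOn pipeline.toList ['!']).filter
      (fun e => !(PySem.Chars.strip e).isEmpty)).map PySem.Chars.strip
  -- for idx, elem in enumerate(elems): … formatted.append(line)
  let formatted := (PySem.List.enumerate elems 0).foldl (fun acc p =>
      let indent : List Char := if p.1 == 0 then [] else [' ', ' ']
      let line := if p.1 < (elems.length : Int) - 1
        then indent ++ p.2 ++ [' ', '!', ' ', '\\']
        else indent ++ p.2
      acc ++ [line]) []
  -- '\n'.join(formatted)
  String.ofList (PySem.Chars.join ['\n'] formatted)

-- ===== PORT B =====
def format_pipeline_multiline_alt (pipeline : String) : String :=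
  -- elems = [e for e in map(str.strip, pipeline.split('!')) if e]
  let elems := ((PySem.Chars.splitOn pipeline.toList ['!']).map PySem.Chars.strip).filter
      (fun e => !e.isEmpty)
  -- ' ! \\\n  '.join(elems)
  String.ofList (PySem.Chars.join [' ', '!', ' ', '\\', '\n', ' ', ' '] elems)

-- ===== PRECONDITION & SPEC =====
def Spec_format_pipeline_multiline (pipeline : String) (out : String) : Prop := out = format_pipeline_multiline_alt pipeline
instance (pipeline : String) (out : String) : Decidable (Spec_format_pipeline_multiline pipeline out) := by unfold Spec_format_pipeline_multiline; infer_instance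

-- ===== CLAIM (what is proved, stated in full; the proofs are below) =====
def Claim_equal_format_pipeline_multiline : Prop := ∀ (pipeline : String), Dom_format_pipeline_multiline pipeline → Spec_format_pipeline_multiline pipeline (format_pipeline_multiline pipeline)

-- ===== LEMMAS AND PROOFS =====

lemma pv_join_cons_ne_nil (sep a : List Char) (L : List (List Char)) (h : L ≠ []) :
    PySem.Chars.join sep (a :: L) = a ++ sep ++ PySem.Chars.join sep L := by
  cases L with
  | nil => exact absurd rfl h
  | cons b bs => rw [PySem.Chars.join_cons_cons]

-- the tail of A's loop: every index is ≥ 1 (so the indent fires) and only the last misses the " ! \"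
lemma pv_tail_join : ∀ (ys : List (List Char)) (y : List Char) (s n : Int), 1 ≤ s → s + 1 + ys.length = n →
    PySem.Chars.join ['\n'] ((PySem.List.enumerate (y :: ys) s).map
      (fun p => if p.1 < n - 1
        then (if p.1 == 0 then [] else [' ', ' ']) ++ p.2 ++ [' ', '!', ' ', '\\']
        else (if p.1 == 0 then [] else [' ', ' ']) ++ p.2))
    = [' ', ' '] ++ PySem.Chars.join [' ', '!', ' ', '\\', '\n', ' ', ' '] (y :: ys) := by
  intro ys
  induction ys with
  | nil =>
    intro y s n hs hn
    simp only [PySem.List.enumerate_cons, PySem.List.enumerate_nil, List.map]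
    rw [PySem.Chars.join_singleton, PySem.Chars.join_singleton]
    have h0 : (s == (0:Int)) = false := by simp; omega
    have h1 : ¬ (s < n - 1) := by simp at hn ⊢; omega
    simp [h0, h1]
  | cons z zs ih =>
    intro y s n hs hn
    rw [PySem.List.enumerate_cons y (z :: zs) s, List.map_cons,
        pv_join_cons_ne_nil _ _ _ (by simp [PySem.List.enumerate_cons]),
        ih z (s + 1) n (by omega) (by simp at hn ⊢; omega),
        PySem.Chars.join_cons_cons]
    have h0 : (s == (0:Int)) = false := by simp; omega
    have h1 : s < n - 1 := by simp at hn; omega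
    simp [h0, h1]

-- A's whole loop output, joined with '\n', is B's single join
lemma pv_join_lines (l : List (List Char)) :
    PySem.Chars.join ['\n'] ((PySem.List.enumerate l 0).map
      (fun p => if p.1 < (l.length : Int) - 1
        then (if p.1 == 0 then [] else [' ', ' ']) ++ p.2 ++ [' ', '!', ' ', '\\']
        else (if p.1 == 0 then [] else [' ', ' ']) ++ p.2))
    = PySem.Chars.join [' ', '!', ' ', '\\', '\n', ' ', ' '] l := by
  match l with
  | [] => simp [PySem.List.enumerate_nil, PySem.Chars.join_nil]
  | [x] =>
    simp only [PySem.List.enumerate_cons, PySem.List.enumerate_nil, List.map]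
    rw [PySem.Chars.join_singleton, PySem.Chars.join_singleton]
    simp
  | x :: y :: ys =>
    rw [PySem.List.enumerate_cons x (y :: ys) 0, List.map_cons,
        pv_join_cons_ne_nil _ _ _ (by simp [PySem.List.enumerate_cons]),
        pv_tail_join ys y (0 + 1) ((x :: y :: ys).length : Int) (by omega) (by simp; omega),
        PySem.Chars.join_cons_cons]
    simp

theorem format_pipeline_multiline_spec : Claim_equal_format_pipeline_multiline := by
  intro pipeline _
  unfold Spec_format_pipeline_multiline format_pipeline_multiline format_pipeline_multiline_alt
  simp only [List.filter_map]
  rw [PySem.List.foldl_append_singleton_eq_map]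
  rw [List.nil_append]
  rw [pv_join_lines]
  rfl
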